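-- pv_equiv track=rewrite | github.com/NelsonAlmeida-18/POO | Ficha2/testeTemp.py | formula1
-- ===== SOURCE A (Python) =====
-- def formula1(log):
--     dicOfTimes={}
--     for time,name in log:
--         if name not in dicOfTimes:
--             dicOfTimes[name]=[time]
--         else:
--             dicOfTimes[name].append(time)
--
--     minTime=0
--     scoreBoard=[]
--     for name in dicOfTimes:
--         fastestLap=0
--         previousLap=0
--         for lap in dicOfTimes[name]:
--             if (lap-previousLap<fastestLap or fastestLap==0):
--                 fastestLap=lap-previousLap
--             previousLap=lap
--         if fastestLap<minTime or minTime==0: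
--             minTime=fastestLap
--         scoreBoard.append((name,fastestLap))
--
--
--     newSb=list(filter(lambda item:(item[1]==minTime), scoreBoard))
--     newSb=[x for x,y in newSb]
--
--     return sorted(newSb)
-- ===== SOURCE B (Python) =====
-- def formula1(log):
--     previousLap = {}
--     fastestLap = {}
--     for time, name in log:
--         diff = time - previousLap.get(name, 0)
--         f = fastestLap.get(name, 0)
--         fastestLap[name] = diff if (diff < f or f == 0) else f
--         previousLap[name] = time
--     minTime = 0
--     for val in fastestLap.values():
--         if val < minTime or minTime == 0:
--             minTime = val
--     return sorted(n for n, v in fastestLap.items() if v == minTime)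
-- ===== Notes on version B (the rewrite author's own statement) =====
-- stated objective: simpler
-- what changed: Replaces A's group-by-name dict of per-name time lists plus a nested second loop with one flat pass over the log keeping two scalar dicts (previous lap and fastest lap per name), then a values scan for the minimum and a comprehension filter.
import Mathlib
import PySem

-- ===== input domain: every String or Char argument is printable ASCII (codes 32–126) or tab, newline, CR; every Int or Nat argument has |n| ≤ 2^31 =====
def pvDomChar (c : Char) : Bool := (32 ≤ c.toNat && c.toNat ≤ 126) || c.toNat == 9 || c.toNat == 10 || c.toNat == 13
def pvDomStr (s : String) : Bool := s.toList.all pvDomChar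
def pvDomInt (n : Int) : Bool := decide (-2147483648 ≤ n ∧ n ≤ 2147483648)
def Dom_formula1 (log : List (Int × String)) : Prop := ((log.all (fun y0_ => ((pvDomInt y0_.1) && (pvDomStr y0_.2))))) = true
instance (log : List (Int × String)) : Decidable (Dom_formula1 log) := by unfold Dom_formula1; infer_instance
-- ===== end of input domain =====

-- B replaces A's per-name time lists and nested second loop by one flat pass with two scalar dicts (simpler decomposition, same result).

-- ===== PORT A =====
-- grouping loop: dicOfTimes[name] = [time] on a new name, else append
def aGroupStep (d : PySem.Dict String (List Int)) (tn : Int × String) : PySem.Dict String (List Int) :=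
  if d.contains tn.2 = false then d.insert tn.2 [tn.1]
  else d.modify tn.2 [] (fun ts => ts ++ [tn.1])

-- inner lap loop body over state (fastestLap, previousLap)
def aLap (fp : Int × Int) (lap : Int) : Int × Int :=
  (if lap - fp.2 < fp.1 ∨ fp.1 = 0 then lap - fp.2 else fp.1, lap)

-- outer loop body over state (minTime, scoreBoard)
def aScore (ms : Int × List (String × Int)) (nt : String × List Int) : Int × List (String × Int) :=
  let fastest := (nt.2.foldl aLap (0, 0)).1
  (if fastest < ms.1 ∨ ms.1 = 0 then fastest else ms.1, ms.2 ++ [(nt.1, fastest)])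

def formula1 (log : List (Int × String)) : List String :=
  let dic := log.foldl aGroupStep PySem.Dict.empty
  let ms := dic.items.foldl aScore (0, [])
  let newSb := (ms.2.filter (fun it => it.2 == ms.1)).map (fun p => p.1)
  PySem.List.sorted newSb (fun x => x) false

-- ===== PORT B =====
-- one flat pass over the log: state (previousLap, fastestLap) dicts
def bStep (pf : PySem.Dict String Int × PySem.Dict String Int) (tn : Int × String) :
    PySem.Dict String Int × PySem.Dict String Int :=
  let diff := tn.1 - pf.1.getD tn.2 0
  let f := pf.2.getD tn.2 0
  (pf.1.insert tn.2 tn.1, pf.2.insert tn.2 (if diff < f ∨ f = 0 then diff else f))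

-- minTime accumulation over fastestLap.values()
def bMin (mt v : Int) : Int := if v < mt ∨ mt = 0 then v else mt

def formula1_alt (log : List (Int × String)) : List String :=
  let pf := log.foldl bStep (PySem.Dict.empty, PySem.Dict.empty)
  let minTime := pf.2.values.foldl bMin 0
  PySem.List.sorted ((pf.2.items.filter (fun p => p.2 == minTime)).map (fun p => p.1)) (fun x => x) false

-- ===== PRECONDITION & SPEC =====
def Spec_formula1 (log : List (Int × String)) (out : List String) : Prop := out = formula1_alt log
instance (log : List (Int × String)) (out : List String) : Decidable (Spec_formula1 log out) := by unfold Spec_formula1; infer_instance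

-- ===== CLAIM (what is proved, stated in full; the proofs are below) =====
def Claim_equal_formula1 : Prop := ∀ (log : List (Int × String)), Dom_formula1 log → Spec_formula1 log (formula1 log)

-- ===== LEMMAS AND PROOFS =====

-- A's grouping update is uniformly an insert of getD ++ [time]
theorem aGroupStep_eq (d : PySem.Dict String (List Int)) (tn : Int × String) :
    aGroupStep d tn = d.insert tn.2 (d.getD tn.2 [] ++ [tn.1]) := by
  unfold aGroupStep PySem.Dict.modify
  by_cases h : d.contains tn.2
  · simp [h]
  · simp only [Bool.not_eq_true] at h
    simp [h, PySem.Dict.getD_of_not_contains _ _ h]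

-- lookup in a value-mapped dict
theorem get?_mapVal {α β : Type} (l : List (String × α)) (g : String × α → β) (n : String) :
    (PySem.Dict.mk (l.map (fun p => (p.1, g p)))).get? n
      = (l.find? (fun p => p.1 == n)).map g := by
  induction l with
  | nil => simp [PySem.Dict.get?]
  | cons p rest ih =>
    simp only [List.map_cons, PySem.Dict.get?_mk_cons, List.find?_cons]
    by_cases h : p.1 == n
    · simp [h]
    · simp only [h, Bool.false_eq_true, if_false]
      exact ih

theorem getD_mapVal {α β : Type} (l : List (String × α)) (g : String × α → β) (n : String) (b : β) :
    (PySem.Dict.mk (l.map (fun p => (p.1, g p)))).getD n b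
      = ((l.find? (fun p => p.1 == n)).map g).getD b := by
  simp [PySem.Dict.getD, get?_mapVal]

theorem contains_mapVal {α β : Type} (l : List (String × α)) (g : String × α → β) (n : String) :
    (PySem.Dict.mk (l.map (fun p => (p.1, g p)))).contains n
      = (PySem.Dict.mk l).contains n := by
  simp [PySem.Dict.contains, List.any_map, Function.comp_def]

-- getD in terms of find? (to connect A's list dict with B's scalar dicts)
theorem getD_eq_find? {α : Type} (d : PySem.Dict String α) (n : String) (b : α) :
    d.getD n b = ((d.items.find? (fun p => p.1 == n)).map (fun p => p.2)).getD b := by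
  simp [PySem.Dict.getD, PySem.Dict.get?]

-- main invariant of the two folds
theorem fold_inv (log : List (Int × String)) :
    (log.foldl bStep (PySem.Dict.empty, PySem.Dict.empty)).1.items
      = (log.foldl aGroupStep PySem.Dict.empty).items.map (fun p => (p.1, (p.2.foldl aLap (0, 0)).2))
    ∧ (log.foldl bStep (PySem.Dict.empty, PySem.Dict.empty)).2.items
      = (log.foldl aGroupStep PySem.Dict.empty).items.map (fun p => (p.1, (p.2.foldl aLap (0, 0)).1)) := by
  induction log using List.reverseRecOn with
  | nil => simp [PySem.Dict.empty]
  | append_singleton l x ih =>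
    obtain ⟨h1, h2⟩ := ih
    set dic := l.foldl aGroupStep PySem.Dict.empty with hdic
    set pf := l.foldl bStep (PySem.Dict.empty, PySem.Dict.empty) with hpf
    have hpd : pf.1 = PySem.Dict.mk (dic.items.map (fun p => (p.1, (p.2.foldl aLap (0, 0)).2))) := by
      apply PySem.Dict.ext; exact h1
    have hfd : pf.2 = PySem.Dict.mk (dic.items.map (fun p => (p.1, (p.2.foldl aLap (0, 0)).1))) := by
      apply PySem.Dict.ext; exact h2
    have hfold : ∀ {α : Type} (f : α → (Int × String) → α) (init : α),
        (l ++ [x]).foldl f init = f (l.foldl f init) x := by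
      intro α f init; simp
    rw [hfold, hfold, aGroupStep_eq]
    set ts := dic.getD x.2 [] with hts
    -- the scalar lookups in bStep agree with the fold of A's per-name list
    have hp : pf.1.getD x.2 0 = (ts.foldl aLap (0, 0)).2 := by
      rw [hpd, getD_mapVal, hts, getD_eq_find?]
      cases dic.items.find? (fun p => p.1 == x.2) <;> simp
    have hf : pf.2.getD x.2 0 = (ts.foldl aLap (0, 0)).1 := by
      rw [hfd, getD_mapVal, hts, getD_eq_find?]
      cases dic.items.find? (fun p => p.1 == x.2) <;> simp
    have hv : (if x.1 - pf.1.getD x.2 0 < pf.2.getD x.2 0 ∨ pf.2.getD x.2 0 = 0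
                 then x.1 - pf.1.getD x.2 0 else pf.2.getD x.2 0)
        = ((ts ++ [x.1]).foldl aLap (0, 0)).1 := by
      rw [hp, hf, List.foldl_append]
      rfl
    have hcont1 : pf.1.contains x.2 = dic.contains x.2 := by
      rw [hpd, contains_mapVal]
    have hcont2 : pf.2.contains x.2 = dic.contains x.2 := by
      rw [hfd, contains_mapVal]
    have hb : bStep pf x
        = (pf.1.insert x.2 x.1, pf.2.insert x.2 (((ts ++ [x.1]).foldl aLap (0, 0)).1)) := by
      simp only [bStep]
      rw [hv]
    rw [← hpf, ← hdic, hb]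
    by_cases hc : dic.contains x.2
    · constructor
      · rw [PySem.Dict.items_insert_of_contains _ _ (hcont1 ▸ hc),
            PySem.Dict.items_insert_of_contains _ _ hc, h1, List.map_map, List.map_map]
        apply List.map_congr_left
        intro p _
        by_cases hpk : p.1 = x.2 <;> simp [hpk, List.foldl_append, aLap]
      · rw [PySem.Dict.items_insert_of_contains _ _ (hcont2 ▸ hc),
            PySem.Dict.items_insert_of_contains _ _ hc, h2, List.map_map, List.map_map]
        apply List.map_congr_left
        intro p _
        by_cases hpk : p.1 = x.2 <;> simp [hpk, List.foldl_append, aLap]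
    · simp only [Bool.not_eq_true] at hc
      have hts0 : ts = [] := by
        rw [hts]; exact PySem.Dict.getD_of_not_contains _ _ hc
      constructor
      · rw [PySem.Dict.items_insert_of_not_contains _ _ (hcont1.trans hc),
            PySem.Dict.items_insert_of_not_contains _ _ hc, h1, List.map_append]
        simp [hts0, aLap]
      · rw [PySem.Dict.items_insert_of_not_contains _ _ (hcont2.trans hc),
            PySem.Dict.items_insert_of_not_contains _ _ hc, h2, List.map_append]
        simp [hts0, aLap]

-- A's second loop splits into a min-fold and an appended map
theorem foldl_aScore (l : List (String × List Int)) (mt : Int) (sb : List (String × Int)) :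
    l.foldl aScore (mt, sb)
      = (l.foldl (fun m p => bMin m ((p.2.foldl aLap (0, 0)).1)) mt,
         sb ++ l.map (fun p => (p.1, (p.2.foldl aLap (0, 0)).1))) := by
  induction l generalizing mt sb with
  | nil => simp
  | cons p rest ih =>
    simp only [List.foldl_cons, List.map_cons]
    rw [show aScore (mt, sb) p
          = (bMin mt ((p.2.foldl aLap (0, 0)).1), sb ++ [(p.1, (p.2.foldl aLap (0, 0)).1)]) from rfl,
        ih]
    simp

-- ===== VERDICT (by name: the statement is the Claim_ definition above) =====
theorem formula1_spec : Claim_equal_formula1 := by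
  intro log _
  unfold Spec_formula1
  simp only [formula1, formula1_alt]
  obtain ⟨h1, h2⟩ := fold_inv log
  set dic := log.foldl aGroupStep PySem.Dict.empty with hdic
  set pf := log.foldl bStep (PySem.Dict.empty, PySem.Dict.empty) with hpf
  rw [foldl_aScore]
  have hvals : pf.2.values = dic.items.map (fun p => (p.2.foldl aLap (0, 0)).1) := by
    show pf.2.items.map (fun x => x.2) = _
    rw [h2, List.map_map]
    rfl
  have hmin : pf.2.values.foldl bMin 0
      = dic.items.foldl (fun m p => bMin m ((p.2.foldl aLap (0, 0)).1)) 0 := by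
    rw [hvals, List.foldl_map]
  rw [hmin, h2]
  simp
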